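-- pv_equiv track=rewrite | github.com/bogdankhavroniuk787/Km-02_Khavroniuk_DKR_2_game_in_words | ps3.py | update_hand
-- ===== SOURCE A (Python) =====
-- def update_hand(hand, word):
--     """
--     Does NOT assume that hand contains every letter in word at least as
--     many times as the letter appears in word. Letters in word that don't
--     appear in hand should be ignored. Letters that appear in word more times
--     than in hand should never result in a negative count; instead, set the
--     count in the returned hand to 0 (or remove the letter from the
--     dictionary, depending on how your code is structured).
--
--     Updates the hand: uses up the letters in the given word
--     and returns the new hand, without those letters in it.
--
--     Has no side effects: does not modify hand.
--
--     word: string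
--     hand: dictionary (string -> int)
--     returns: dictionary (string -> int)
--     """
--     hand_update = hand.copy()
--     word = word.lower()
--     for letter in word:
--         if letter in hand:
--             hand_update[letter] = hand_update[letter] - 1
--             if hand_update[letter] < 0:
--                 hand_update[letter] = 0
--         else :
--             continue
--
--     return hand_update
-- ===== SOURCE B (Python) =====
-- def update_hand(hand, word):
--     wc = {}
--     for ch in word.lower():
--         wc[ch] = wc.get(ch, 0) + 1
--     new_hand = {}
--     for k, v in hand.items():
--         c = wc.get(k, 0)
--         new_hand[k] = v if c == 0 else max(0, v - c)
--     return new_hand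
-- ===== Notes on version B (the rewrite author's own statement) =====
-- stated objective: alternative
-- what changed: A copies the hand and walks the word, decrementing and clamping one letter at a time; B first builds a frequency table of the lowered word's letters and then produces the result in a single map over the hand's items using max(0, v - count).
import Mathlib
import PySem

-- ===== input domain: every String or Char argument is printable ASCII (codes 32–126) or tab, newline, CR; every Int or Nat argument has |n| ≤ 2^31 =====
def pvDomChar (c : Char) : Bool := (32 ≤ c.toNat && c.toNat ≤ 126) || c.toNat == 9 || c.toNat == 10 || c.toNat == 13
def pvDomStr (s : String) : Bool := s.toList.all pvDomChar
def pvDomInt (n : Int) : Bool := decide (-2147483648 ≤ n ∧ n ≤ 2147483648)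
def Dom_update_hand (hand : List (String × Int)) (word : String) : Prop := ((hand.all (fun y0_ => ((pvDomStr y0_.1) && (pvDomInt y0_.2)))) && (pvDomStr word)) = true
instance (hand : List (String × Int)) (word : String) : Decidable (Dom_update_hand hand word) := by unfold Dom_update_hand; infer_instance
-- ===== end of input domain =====

-- B replaces A's per-letter decrement-and-clamp loop over the word by a precomputed
-- letter counter plus a single map over the hand (objective: alternative decomposition).

-- ===== PORT A =====
-- hand_update[letter] always exists when 'letter in hand' (hand_update starts as a copy
-- of hand and only overwrites values), so Python's d[letter] is ported as getD _ _ 0.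
def update_hand (hand : List (String × Int)) (word : String) : List (String × Int) :=
  let handD : PySem.Dict String Int := PySem.Dict.mk hand
  ((PySem.Str.lower word).toList.foldl (fun hu letter =>
      let l := String.singleton letter
      if handD.contains l then
        let hu1 := hu.insert l (hu.getD l 0 - 1)
        if hu1.getD l 0 < 0 then hu1.insert l 0 else hu1
      else hu)
    handD).items

-- ===== PORT B =====
def update_hand_alt (hand : List (String × Int)) (word : String) : List (String × Int) :=
  let wc : PySem.Dict String Int :=
    (PySem.Str.lower word).toList.foldl
      (fun d ch => d.insert (String.singleton ch) (d.getD (String.singleton ch) 0 + 1))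
      PySem.Dict.empty
  hand.map (fun p =>
    let c := wc.getD p.1 0
    (p.1, if c = 0 then p.2 else max 0 (p.2 - c)))

-- ===== PRECONDITION & SPEC =====
-- Pre_ excludes association lists with duplicate keys: a Python dict always has distinct
-- keys, so such lists correspond to no Python input and the ports' values there are accidental.
def Pre_update_hand (hand : List (String × Int)) (word : String) : Prop :=
  (hand.map Prod.fst).Nodup
instance (hand : List (String × Int)) (word : String) : Decidable (Pre_update_hand hand word) := by unfold Pre_update_hand; infer_instance
def pvWitness_update_hand : (List (String × Int)) × String := ([("a", 2), ("b", 1)], "abc")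

def Spec_update_hand (hand : List (String × Int)) (word : String) (out : List (String × Int)) : Prop := out = update_hand_alt hand word
instance (hand : List (String × Int)) (word : String) (out : List (String × Int)) : Decidable (Spec_update_hand hand word out) := by unfold Spec_update_hand; infer_instance

-- ===== CLAIM (what is proved, stated in full; the proofs are below) =====
def Claim_equal_update_hand : Prop := ∀ (hand : List (String × Int)) (word : String), Dom_update_hand hand word → Pre_update_hand hand word → Spec_update_hand hand word (update_hand hand word)

-- ===== LEMMAS AND PROOFS =====

-- A's clamped repeated decrement, expressed as a function of the count seen so far.
def pvF (c : Nat) (v : Int) : Int := if c = 0 then v else max 0 (v - (c : Int))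

-- inserting twice at the same key = inserting the last value
theorem pv_insert_insert {κ ν : Type} [BEq κ] [LawfulBEq κ]
    (d : PySem.Dict κ ν) (k : κ) (v w : ν) :
    (d.insert k v).insert k w = d.insert k w := by
  apply PySem.Dict.ext
  by_cases h : d.contains k = true
  · rw [PySem.Dict.items_insert_of_contains _ _ (PySem.Dict.contains_insert_self d k v),
        PySem.Dict.items_insert_of_contains _ _ h,
        PySem.Dict.items_insert_of_contains _ _ h, List.map_map]
    apply List.map_congr_left
    intro p _
    by_cases hp : p.1 == k <;> simp [hp]
  · have h' : d.contains k = false := by simpa using h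
    rw [PySem.Dict.items_insert_of_contains _ _ (PySem.Dict.contains_insert_self d k v),
        PySem.Dict.items_insert_of_not_contains _ _ h',
        PySem.Dict.items_insert_of_not_contains _ _ h', List.map_append]
    have hk : ∀ p ∈ d.items, ¬ (p.1 = k) := by
      intro p hp hpk
      have hck : d.contains k = true := by
        rw [PySem.Dict.contains_iff_mem_keys]
        exact hpk ▸ PySem.Dict.mem_keys_of_mem_items d hp
      simp [hck] at h'
    have hmap : d.items.map (fun p => if p.1 == k then (k, w) else p) = d.items := by
      conv_rhs => rw [← List.map_id d.items]
      apply List.map_congr_left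
      intro p hp
      simp [hk p hp]
    simp [hmap]

-- keys of a dict built from a value-mapped association list
theorem pv_keys_mk_map (hand : List (String × Int)) (f : String × Int → Int) :
    (PySem.Dict.mk (hand.map (fun p => (p.1, f p)))).keys = hand.map Prod.fst := by
  simp [PySem.Dict.keys, List.map_map]

-- getD on such a dict, at a key present (uniquely) in hand
theorem pv_getD_mk_map (hand : List (String × Int)) (f : String × Int → Int)
    (hnd : (hand.map Prod.fst).Nodup) (p0 : String × Int) (hp0 : p0 ∈ hand) :
    (PySem.Dict.mk (hand.map (fun p => (p.1, f p)))).getD p0.1 0 = f p0 := by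
  apply PySem.Dict.getD_of_mem_items
  · show (p0.1, f p0) ∈ (hand.map (fun p => (p.1, f p)))
    exact List.mem_map_of_mem hp0
  · rw [pv_keys_mk_map]; exact hnd

-- items of inserting at a key of hand into such a dict
theorem pv_insert_mk_map (hand : List (String × Int)) (f : String × Int → Int)
    (l : String) (x : Int) (hl : l ∈ hand.map Prod.fst) :
    ((PySem.Dict.mk (hand.map (fun p => (p.1, f p)))).insert l x).items
      = hand.map (fun p => if p.1 = l then (p.1, x) else (p.1, f p)) := by
  have hc : (PySem.Dict.mk (hand.map (fun p => (p.1, f p)))).contains l = true := by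
    rw [PySem.Dict.contains_iff_mem_keys, pv_keys_mk_map]; exact hl
  rw [PySem.Dict.items_insert_of_contains _ _ hc]
  show (hand.map (fun p => (p.1, f p))).map _ = _
  rw [List.map_map]
  apply List.map_congr_left
  intro p _
  by_cases hp : p.1 = l <;> simp [hp]

-- the clamped decrement advances pvF by one occurrence
theorem pvF_step (c : Nat) (v : Int) :
    (if pvF c v - 1 < 0 then (0 : Int) else pvF c v - 1) = pvF (c + 1) v := by
  rcases Nat.eq_zero_or_pos c with h | h
  · subst h; simp [pvF, Int.max_def]; split_ifs <;> omega
  · have hc : c ≠ 0 := by omega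
    have hc1 : c + 1 ≠ 0 := by omega
    simp only [pvF, if_neg hc, if_neg hc1, Int.max_def]
    split_ifs <;> push_cast <;> omega

-- A's loop over any char list computes pvF of the occurrence counts, per hand entry
theorem pv_loopA (hand : List (String × Int)) (hnd : (hand.map Prod.fst).Nodup)
    (ws : List Char) :
    ws.foldl (fun hu letter =>
        let l := String.singleton letter
        if (PySem.Dict.mk hand).contains l then
          let hu1 := hu.insert l (hu.getD l 0 - 1)
          if hu1.getD l 0 < 0 then hu1.insert l 0 else hu1
        else hu)
      (PySem.Dict.mk hand)
    = PySem.Dict.mk (hand.map (fun p => (p.1, pvF ((ws.map String.singleton).count p.1) p.2))) := by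
  induction ws using List.reverseRecOn with
  | nil =>
    simp [pvF]
  | append_singleton ws ch ih =>
    rw [List.foldl_append, ih, List.foldl_cons, List.foldl_nil]
    simp only []
    set l := String.singleton ch with hldef
    set d := PySem.Dict.mk (hand.map (fun p => (p.1, pvF ((ws.map String.singleton).count p.1) p.2))) with hd
    have hcount : ∀ p : String × Int,
        ((ws ++ [ch]).map String.singleton).count p.1
          = (ws.map String.singleton).count p.1 + (if p.1 = l then 1 else 0) := by
      intro p
      rw [List.map_append, List.count_append]
      simp only [List.map_cons, List.map_nil, List.count_singleton, hldef]
      by_cases hpl : p.1 = String.singleton ch <;> simp [hpl, beq_iff_eq]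
      · exact fun h => hpl h.symm
    by_cases hmem : l ∈ hand.map Prod.fst
    · have hcont : (PySem.Dict.mk hand).contains l = true := by
        rw [PySem.Dict.contains_iff_mem_keys]
        simpa [PySem.Dict.keys, PySem.Dict.items] using hmem
      rw [if_pos hcont]
      rw [PySem.Dict.getD_insert_self]
      have hcollapse :
          (if d.getD l 0 - 1 < 0 then (d.insert l (d.getD l 0 - 1)).insert l 0
           else d.insert l (d.getD l 0 - 1))
          = d.insert l (if d.getD l 0 - 1 < 0 then 0 else d.getD l 0 - 1) := by
        split_ifs with h
        · rw [pv_insert_insert]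
        · rfl
      rw [hcollapse]
      apply PySem.Dict.ext
      rw [hd, pv_insert_mk_map hand _ l _ hmem]
      show _ = (hand.map _)
      apply List.map_congr_left
      intro p hp
      by_cases hpl : p.1 = l
      · rw [if_pos hpl]
        obtain ⟨p0, hp0, hp0l⟩ := List.mem_map.mp hmem
        have hpp0 : p = p0 :=
          List.inj_on_of_nodup_map hnd hp hp0 (by rw [hpl, hp0l])
        have hget : d.getD l 0 = pvF ((ws.map String.singleton).count l) p.2 := by
          rw [hd, ← hpl]
          exact pv_getD_mk_map hand _ hnd p hp
        rw [hget, hcount p, if_pos hpl, ← hpl, pvF_step]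
      · rw [if_neg hpl, hcount p, if_neg hpl, Nat.add_zero]
    · have hcont : (PySem.Dict.mk hand).contains l = false := by
        rw [← Bool.not_eq_true, PySem.Dict.contains_iff_mem_keys]
        simpa [PySem.Dict.keys, PySem.Dict.items] using hmem
      rw [hcont]
      simp only [Bool.false_eq_true, if_false]
      rw [hd]
      congr 1
      apply List.map_congr_left
      intro p hp
      have hpl : p.1 ≠ l := by
        intro h; exact hmem (h ▸ List.mem_map_of_mem hp)
      rw [hcount p, if_neg hpl, Nat.add_zero]

-- ===== VERDICT (by name: the statement is the Claim_ definition above) =====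
theorem update_hand_spec : Claim_equal_update_hand := by
  intro hand word _hdom hpre
  unfold Spec_update_hand update_hand update_hand_alt
  simp only []
  rw [pv_loopA hand hpre]
  show (hand.map _) = hand.map _
  apply List.map_congr_left
  intro p _
  rw [← List.foldl_map (f := String.singleton)
        (g := fun (d : PySem.Dict String Int) x => d.insert x (d.getD x 0 + 1)),
      PySem.Dict.foldl_insert_getD_add_one_eq_counter, PySem.Dict.getD_counter]
  unfold pvF
  simp only [Nat.cast_eq_zero]
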